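-- pv_equiv track=rewrite | github.com/flora336/icq | prepare_data.py | features_to_caseids
-- ===== SOURCE A (Python) =====
-- from collections import defaultdict
--
-- def features_to_caseids(guid_features):
--
--     feature_case_ids = defaultdict(set)
--     feature_choice_ids = defaultdict(set)
--     gid_list = defaultdict(list)
--     for tid, feature_list in guid_features.items():
--         gid = tid.split("-")[0]
--         gid_list[gid].append(tid)
--
--     for gid, tids in gid_list.items():
--         counter = defaultdict(set)
--         for tid in tids:
--             for f in guid_features[tid]:
--                 counter[f].add(tid)
--                 feature_choice_ids[f].add(tid)
--         for feature, c in counter.items():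
--             if len(c) < len(tids):
--                 feature_case_ids[feature].add(gid)
--                 #feature_choice_ids[feature].update(tids)
--             #features_to_caseids[f].add(tid.split("-")[0])
--
--     return feature_case_ids, feature_choice_ids
-- ===== SOURCE B (Python) =====
-- from collections import defaultdict
--
-- def features_to_caseids(guid_features):
--     # A feature is a "case" feature of a group iff some tid of the group lacks it,
--     # i.e. it lies outside the intersection of the per-tid feature sets: the
--     # per-group tid-set counting of A is replaced by a set intersection.
--     groups = defaultdict(list)
--     for tid in guid_features:
--         groups[tid.split("-")[0]].append(tid)
--     feature_choice_ids = defaultdict(set)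
--     for tids in groups.values():
--         for tid in tids:
--             for f in guid_features[tid]:
--                 feature_choice_ids[f].add(tid)
--     feature_case_ids = defaultdict(set)
--     for gid, tids in groups.items():
--         common = set.intersection(*(set(guid_features[t]) for t in tids))
--         for f in dict.fromkeys(x for t in tids for x in guid_features[t]):
--             if f not in common:
--                 feature_case_ids[f].add(gid)
--     return feature_case_ids, feature_choice_ids
-- ===== Notes on version B (the rewrite author's own statement) =====
-- stated objective: alternative
-- what changed: A counts, per group and feature, the set of tids carrying the feature and compares its size with the group size; B instead computes the intersection of the group's per-tid feature sets and marks a feature as a case feature iff it lies outside that intersection (no counting or size comparison), with the choice dict built in its own flat pass.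
import Mathlib
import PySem

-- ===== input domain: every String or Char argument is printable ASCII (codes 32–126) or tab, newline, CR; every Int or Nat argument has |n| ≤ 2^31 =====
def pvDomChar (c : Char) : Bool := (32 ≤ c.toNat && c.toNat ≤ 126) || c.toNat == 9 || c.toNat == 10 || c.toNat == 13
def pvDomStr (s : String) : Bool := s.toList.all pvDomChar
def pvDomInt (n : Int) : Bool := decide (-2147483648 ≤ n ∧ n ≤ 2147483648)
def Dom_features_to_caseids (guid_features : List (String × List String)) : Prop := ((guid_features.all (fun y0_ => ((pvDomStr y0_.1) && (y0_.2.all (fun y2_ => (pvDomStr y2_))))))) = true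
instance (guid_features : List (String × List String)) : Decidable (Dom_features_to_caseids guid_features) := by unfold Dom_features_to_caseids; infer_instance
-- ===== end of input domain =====

-- B replaces A's per-group tid-set counting by a set-intersection criterion: a feature is a case feature of a group iff it is missing from the intersection of the group's per-tid feature sets (alternative algorithm, same cost).


-- ===== PORT A =====
-- tid.split("-")[0]: split with a nonempty separator is never empty, so [0] cannot raise
def pvGid (tid : String) : String := (((PySem.Str.split? tid "-").getD []).headD "")

def features_to_caseids (guid_features : List (String × List String)) :
    (List (String × List String)) × (List (String × List String)) :=
  let gf : PySem.Dict String (List String) := PySem.Dict.mk guid_features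
  -- for tid in guid_features: gid_list[gid].append(tid)
  let gid_list : PySem.Dict String (List String) :=
    guid_features.foldl (fun d p => d.modify (pvGid p.1) [] (fun l => l ++ [p.1])) PySem.Dict.empty
  -- for gid, tids in gid_list.items(): build counter, update choice, then qualify into case
  let st :=
    gid_list.items.foldl (fun st gp =>
      let cc :=
        gp.2.foldl (fun cc tid =>
          -- guid_features[tid]: tid is a key of the dict, so KeyError cannot occur; getD is exact here
          (gf.getD tid []).foldl (fun cc f =>
            (cc.1.modify f [] (fun s => PySem.Set.add s tid),
             cc.2.modify f [] (fun s => PySem.Set.add s tid))) cc)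
          ((PySem.Dict.empty : PySem.Dict String (PySem.Set String)), st.2)
      let case :=
        cc.1.items.foldl (fun case p =>
          if p.2.length < gp.2.length then case.modify p.1 [] (fun s => PySem.Set.add s gp.1)
          else case) st.1
      (case, cc.2))
      ((PySem.Dict.empty : PySem.Dict String (PySem.Set String)),
       (PySem.Dict.empty : PySem.Dict String (PySem.Set String)))
  (st.1.items, st.2.items)

-- ===== PORT B =====
-- set.intersection(*(set(guid_features[t]) for t in tids)); only membership in the result is
-- used afterwards, which is order-independent, so the intersection is kept in first-set order.
-- The [] arm mirrors nothing in Source B (there the starred call would raise), but groups values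
-- are never empty, so it is unreachable on B's inputs.
def pvCommon (gf : PySem.Dict String (List String)) (tids : List String) : PySem.Set String :=
  match tids with
  | [] => PySem.Set.empty
  | t0 :: rest =>
      rest.foldl (fun c t => PySem.Set.inter c (PySem.Set.ofList (gf.getD t [])))
        (PySem.Set.ofList (gf.getD t0 []))

def features_to_caseids_alt (guid_features : List (String × List String)) :
    (List (String × List String)) × (List (String × List String)) :=
  let gf : PySem.Dict String (List String) := PySem.Dict.mk guid_features
  -- for tid in guid_features: groups[tid.split("-")[0]].append(tid)
  let groups : PySem.Dict String (List String) :=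
    guid_features.foldl (fun d p => d.modify (pvGid p.1) [] (fun l => l ++ [p.1])) PySem.Dict.empty
  -- for tids in groups.values(): for tid in tids: for f in guid_features[tid]: choice[f].add(tid)
  let choice : PySem.Dict String (PySem.Set String) :=
    groups.values.foldl (fun ch tids =>
      tids.foldl (fun ch tid =>
        (gf.getD tid []).foldl (fun ch f => ch.modify f [] (fun s => PySem.Set.add s tid)) ch) ch)
      PySem.Dict.empty
  -- for gid, tids in groups.items(): common = intersection; for f in dict.fromkeys(…): if f not in common: case[f].add(gid)
  let case : PySem.Dict String (PySem.Set String) :=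
    groups.items.foldl (fun case gp =>
      let common := pvCommon gf gp.2
      (PySem.List.dedup (gp.2.flatMap (fun t => gf.getD t []))).foldl
        (fun case f =>
          if common.contains f then case
          else case.modify f [] (fun s => PySem.Set.add s gp.1)) case)
      PySem.Dict.empty
  (case.items, choice.items)

-- ===== PRECONDITION & SPEC =====
-- Pre_ excludes association lists with duplicate tids: A's parameter is a Python dict, which cannot hold duplicate keys.
def Pre_features_to_caseids (guid_features : List (String × List String)) : Prop :=
  (guid_features.map Prod.fst).Nodup
instance (guid_features : List (String × List String)) : Decidable (Pre_features_to_caseids guid_features) := by unfold Pre_features_to_caseids; infer_instance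
def pvWitness_features_to_caseids : (List (String × List String)) :=
  [("a-1", ["f", "g"]), ("a-2", ["f"]), ("b-1", ["g"])]

def Spec_features_to_caseids (guid_features : List (String × List String)) (out : (List (String × List String)) × (List (String × List String))) : Prop := out = features_to_caseids_alt guid_features
instance (guid_features : List (String × List String)) (out : (List (String × List String)) × (List (String × List String))) : Decidable (Spec_features_to_caseids guid_features out) := by unfold Spec_features_to_caseids; infer_instance

-- ===== CLAIM (what is proved, stated in full; the proofs are below) =====
def Claim_equal_features_to_caseids : Prop := ∀ (guid_features : List (String × List String)), Dom_features_to_caseids guid_features → Pre_features_to_caseids guid_features → Spec_features_to_caseids guid_features (features_to_caseids guid_features)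

-- ===== LEMMAS AND PROOFS =====
-- helper abbreviations used only by the proofs
def pvGroups (gf : List (String × List String)) : PySem.Dict String (List String) :=
  gf.foldl (fun d p => d.modify (pvGid p.1) [] (fun l => l ++ [p.1])) PySem.Dict.empty

def pvPairs (gf : List (String × List String)) (gp : String × List String) : List (String × String) :=
  gp.2.flatMap (fun tid => ((PySem.Dict.mk gf).getD tid []).map (fun f => (tid, f)))

def pvCounter (gf : List (String × List String)) (gp : String × List String) :
    PySem.Dict String (PySem.Set String) :=
  (pvPairs gf gp).foldl (fun d q => d.modify q.2 [] (fun s => PySem.Set.add s q.1)) PySem.Dict.empty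

-- the nested counter of a group, in A's loop order
def pvCounterN (gf : List (String × List String)) (gp : String × List String) :
    PySem.Dict String (PySem.Set String) :=
  gp.2.foldl (fun c tid => ((PySem.Dict.mk gf).getD tid []).foldl
      (fun c f => c.modify f [] (fun s => PySem.Set.add s tid)) c) PySem.Dict.empty

-- componentwise pair fold splits (PySem.List.foldl_prod_mk with the init eta-expanded)
theorem pv_foldl_prod {β σ₁ σ₂ : Type} (f : σ₁ → β → σ₁) (g : σ₂ → β → σ₂) (l : List β) (s : σ₁ × σ₂) :
    List.foldl (fun s e => (f s.1 e, g s.2 e)) s l = (List.foldl f s.1 l, List.foldl g s.2 l) := by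
  cases s; exact PySem.List.foldl_prod_mk f g l _ _

-- the pairs-form and nested-form counter folds agree
theorem pv_counter_eq (gf : List (String × List String)) (gp : String × List String) :
    pvCounter gf gp = pvCounterN gf gp := by
  simp [pvCounter, pvCounterN, pvPairs, List.foldl_flatMap, List.foldl_map]

-- A's interleaved (counter, choice) fold splits into two independent folds
theorem pv_A_inner (gf : List (String × List String)) :
    ∀ (tids : List String) (c ch : PySem.Dict String (PySem.Set String)),
    tids.foldl (fun cc tid =>
        ((PySem.Dict.mk gf).getD tid []).foldl
          (fun cc f => (cc.1.modify f [] (fun s => PySem.Set.add s tid),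
                        cc.2.modify f [] (fun s => PySem.Set.add s tid))) cc) (c, ch)
      = (tids.foldl (fun c tid => ((PySem.Dict.mk gf).getD tid []).foldl
            (fun c f => c.modify f [] (fun s => PySem.Set.add s tid)) c) c,
         tids.foldl (fun c tid => ((PySem.Dict.mk gf).getD tid []).foldl
            (fun c f => c.modify f [] (fun s => PySem.Set.add s tid)) c) ch) := by
  intro tids
  induction tids with
  | nil => intro c ch; rfl
  | cons tid tids ih =>
    intro c ch
    simp only [List.foldl_cons]
    rw [pv_foldl_prod (fun c f => PySem.Dict.modify c f [] (fun s => PySem.Set.add s tid))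
        (fun c f => PySem.Dict.modify c f [] (fun s => PySem.Set.add s tid))]
    exact ih _ _

-- A's outer fold splits into the case fold and the choice fold
theorem pv_A_split (gf : List (String × List String)) :
    ∀ (gl : List (String × List String)) (c ch : PySem.Dict String (PySem.Set String)),
    gl.foldl (fun st gp =>
        (List.foldl (fun case p =>
            if List.length p.2 < gp.2.length then case.modify p.1 [] (fun s => PySem.Set.add s gp.1) else case)
          st.1
          (gp.2.foldl (fun cc tid =>
              ((PySem.Dict.mk gf).getD tid []).foldl
                (fun cc f => (cc.1.modify f [] (fun s => PySem.Set.add s tid),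
                              cc.2.modify f [] (fun s => PySem.Set.add s tid))) cc)
            (PySem.Dict.empty, st.2)).1.items,
         (gp.2.foldl (fun cc tid =>
              ((PySem.Dict.mk gf).getD tid []).foldl
                (fun cc f => (cc.1.modify f [] (fun s => PySem.Set.add s tid),
                              cc.2.modify f [] (fun s => PySem.Set.add s tid))) cc)
            (PySem.Dict.empty, st.2)).2)) (c, ch)
      = (gl.foldl (fun case gp => (pvCounterN gf gp).items.foldl (fun case p =>
            if List.length p.2 < gp.2.length then case.modify p.1 [] (fun s => PySem.Set.add s gp.1) else case) case) c,
         gl.foldl (fun ch gp => gp.2.foldl (fun c tid => ((PySem.Dict.mk gf).getD tid []).foldl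
            (fun c f => c.modify f [] (fun s => PySem.Set.add s tid)) c) ch) ch) := by
  intro gl
  induction gl with
  | nil => intro c ch; rfl
  | cons gp gl ih =>
    intro c ch
    simp only [List.foldl_cons, pv_A_inner gf gp.2]
    exact ih _ _

-- every value of the groups dict is a sublist of the processed keys
theorem pv_groups_values_sublist (key : String × List String → String) :
    ∀ (l : List (String × List String)) (d : PySem.Dict String (List String)) (acc : List String),
    (∀ v ∈ d.values, v.Sublist acc) →
    ∀ v ∈ (l.foldl (fun d p => d.modify (key p) [] (fun s => s ++ [p.1])) d).values,
      v.Sublist (acc ++ l.map Prod.fst) := by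
  intro l
  induction l with
  | nil => intro d acc h v hv; simpa using h v hv
  | cons p l ih =>
    intro d acc h v hv
    simp only [List.foldl_cons] at hv
    have hstep : ∀ w ∈ (d.modify (key p) [] (fun s => s ++ [p.1])).values, w.Sublist (acc ++ [p.1]) := by
      intro w hw
      have : w = d.getD (key p) [] ++ [p.1] ∨ w ∈ d.values := by
        have hmod : d.modify (key p) [] (fun s => s ++ [p.1])
            = d.insert (key p) (d.getD (key p) [] ++ [p.1]) := rfl
        rw [hmod] at hw
        exact PySem.Dict.mem_values_insert d (key p) _ w hw
      rcases this with rfl | hmem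
      · have hg : d.getD (key p) [] = [] ∨ d.getD (key p) [] ∈ d.values := by
          rcases hget : d.get? (key p) with _ | w0
          · exact Or.inl (PySem.Dict.getD_of_get?_eq_none d [] hget)
          · refine Or.inr ?_
            have := PySem.Dict.mem_items_of_get?_eq_some d hget
            have hval : w0 ∈ d.values := by
              simp only [PySem.Dict.values]
              exact List.mem_map.mpr ⟨(key p, w0), this, rfl⟩
            rw [PySem.Dict.getD_of_get?_eq_some d [] hget]
            exact hval
        rcases hg with hg | hg
        · simp [hg]
        · exact (h _ hg).append_right _
      · exact ((h w hmem).trans (List.sublist_append_left acc [p.1]))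
    have := ih (d.modify (key p) [] (fun s => s ++ [p.1])) (acc ++ [p.1]) hstep v hv
    simpa [List.append_assoc] using this

-- under Pre_ every group's tid list has no duplicates
theorem pv_groups_tids_nodup (gf : List (String × List String))
    (hnd : (gf.map Prod.fst).Nodup) :
    ∀ gp ∈ (pvGroups gf).items, gp.2.Nodup := by
  intro gp hgp
  have hv : gp.2 ∈ (pvGroups gf).values := by
    simp only [PySem.Dict.values]
    exact List.mem_map.mpr ⟨gp, hgp, rfl⟩
  have hsub := pv_groups_values_sublist (fun p => pvGid p.1) gf PySem.Dict.empty []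
    (by intro v hv; simp [PySem.Dict.empty, PySem.Dict.values] at hv) gp.2
    (by simpa [pvGroups] using hv)
  exact (by simpa using hsub : gp.2.Sublist (gf.map Prod.fst)).nodup hnd

-- updating with copies of one element is one add
theorem pv_update_map_const {α : Type} (t : String) :
    ∀ (l : List α) (s : PySem.Set String),
    PySem.Set.update s (l.map (fun _ => t)) = if l.isEmpty then s else PySem.Set.add s t := by
  intro l
  induction l with
  | nil => intro s; rfl
  | cons a l ih =>
    intro s
    have : PySem.Set.update s ((a :: l).map (fun _ => t))
        = PySem.Set.update (PySem.Set.add s t) (l.map (fun _ => t)) := rfl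
    rw [this, ih]
    by_cases h : l.isEmpty <;> simp [h]

-- the value of the counter fold at one key
theorem pv_getD_counterFold (f : String) :
    ∀ (pairs : List (String × String)) (d : PySem.Dict String (PySem.Set String)),
    ((pairs.foldl (fun d q => d.modify q.2 [] (fun s => PySem.Set.add s q.1)) d).getD f [])
      = PySem.Set.update (d.getD f []) ((pairs.filter (fun q => q.2 == f)).map Prod.fst) := by
  intro pairs
  induction pairs with
  | nil => intro d; rfl
  | cons q pairs ih =>
    intro d
    simp only [List.foldl_cons, List.filter_cons]
    by_cases h : q.2 = f
    · have : (q.2 == f) = true := by simp [h]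
      rw [this]
      rw [ih]
      have : (d.modify q.2 [] (fun s => PySem.Set.add s q.1)).getD f []
          = PySem.Set.add (d.getD f []) q.1 := by
        rw [PySem.Dict.getD_modify]; simp [h]
      rw [this]; rfl
    · have : (q.2 == f) = false := by simp [h]
      rw [this]
      rw [ih]
      have : (d.modify q.2 [] (fun s => PySem.Set.add s q.1)).getD f [] = d.getD f [] := by
        rw [PySem.Dict.getD_modify]; simp [Ne.symm h]
      rw [this]
      rfl

-- filtering distributes over flatMap
theorem pv_filter_flatMap {α β : Type} (g : α → List β) (p : β → Bool) (l : List α) :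
    (l.flatMap g).filter p = l.flatMap (fun x => (g x).filter p) := by
  induction l with
  | nil => rfl
  | cons a l ih => simp [List.flatMap_cons, List.filter_append, ih]

-- the counter's value at key f is the list of the group's tids carrying f (tids nodup)
theorem pv_counter_getD (gf : List (String × List String)) (gp : String × List String)
    (hnd : gp.2.Nodup) (f : String) :
    (pvCounterN gf gp).getD f []
      = gp.2.filter (fun t => ((PySem.Dict.mk gf).getD t []).contains f) := by
  rw [← pv_counter_eq]
  unfold pvCounter
  rw [pv_getD_counterFold]
  have hflat : (pvPairs gf gp).filter (fun q => q.2 == f)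
      = gp.2.flatMap (fun t => (((PySem.Dict.mk gf).getD t []).filter (fun x => x == f)).map (fun x => (t, x))) := by
    unfold pvPairs
    rw [pv_filter_flatMap]
    simp [List.filter_map, Function.comp_def]
  rw [hflat]
  have hfst : (gp.2.flatMap (fun t => (((PySem.Dict.mk gf).getD t []).filter (fun x => x == f)).map (fun x => (t, x)))).map Prod.fst
      = gp.2.flatMap (fun t => (((PySem.Dict.mk gf).getD t []).filter (fun x => x == f)).map (fun _ => t)) := by
    simp [List.map_flatMap, List.map_map, Function.comp_def]
  rw [hfst]
  have hupd : ∀ (tids : List String) (s : PySem.Set String),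
      PySem.Set.update s (tids.flatMap (fun t => (((PySem.Dict.mk gf).getD t []).filter (fun x => x == f)).map (fun _ => t)))
        = PySem.Set.update s (tids.filter (fun t => ((PySem.Dict.mk gf).getD t []).contains f)) := by
    intro tids
    induction tids with
    | nil => intro s; rfl
    | cons t tids ih =>
      intro s
      have hsplit : ∀ (l1 l2 : List String) (s : PySem.Set String),
          PySem.Set.update s (l1 ++ l2) = PySem.Set.update (PySem.Set.update s l1) l2 := by
        intro l1 l2 s; simp [PySem.Set.update, List.foldl_append]
      simp only [List.flatMap_cons, List.filter_cons, hsplit]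
      rw [pv_update_map_const, ih]
      by_cases hc : ((PySem.Dict.mk gf).getD t []).contains f = true
      · have hmem : f ∈ ((PySem.Dict.mk gf).getD t []).filter (fun x => x == f) :=
          List.mem_filter.mpr ⟨(by simpa using hc : f ∈ (PySem.Dict.mk gf).getD t []), by simp⟩
        have hne : (((PySem.Dict.mk gf).getD t []).filter (fun x => x == f)).isEmpty ≠ true := by
          simp only [ne_eq, List.isEmpty_iff]
          exact fun hcon => by rw [hcon] at hmem; cases hmem
        rw [if_neg hne, if_pos hc]
        rfl
      · have hnotmem : f ∉ (PySem.Dict.mk gf).getD t [] := by simpa using hc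
        have hnil : (((PySem.Dict.mk gf).getD t []).filter (fun x => x == f)) = [] := by
          rw [List.filter_eq_nil_iff]
          intro a ha
          simp only [beq_iff_eq]
          intro hcontra
          exact hnotmem (hcontra ▸ ha)
        rw [hnil, if_pos (by rfl), if_neg hc]
  rw [hupd]
  have : (PySem.Dict.empty : PySem.Dict String (PySem.Set String)).getD f [] = [] := rfl
  rw [this]
  have hone : PySem.Set.update ([] : PySem.Set String)
      (gp.2.filter (fun t => ((PySem.Dict.mk gf).getD t []).contains f))
      = PySem.Set.ofList (gp.2.filter (fun t => ((PySem.Dict.mk gf).getD t []).contains f)) := rfl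
  rw [hone]
  exact PySem.Set.ofList_eq_self_of_nodup _ (hnd.filter _)

-- the counter's key list is the ordered dedup of the group's flat feature list
theorem pv_counter_keys (gf : List (String × List String)) (gp : String × List String) :
    (pvCounterN gf gp).keys
      = PySem.Set.ofList (gp.2.flatMap (fun t => (PySem.Dict.mk gf).getD t [])) := by
  rw [← pv_counter_eq]
  unfold pvCounter
  rw [PySem.Dict.keys_foldl_modify_key (key := fun q : String × String => q.2)]
  have : (pvPairs gf gp).map (fun q => q.2) = gp.2.flatMap (fun t => (PySem.Dict.mk gf).getD t []) := by
    simp [pvPairs, List.map_flatMap, List.map_map, Function.comp_def]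
  rw [this]
  rfl

theorem pv_counter_keys_nodup (gf : List (String × List String)) (gp : String × List String) :
    (pvCounterN gf gp).keys.Nodup := by
  rw [pv_counter_keys]; exact PySem.Set.nodup_ofList _

-- membership in the running intersection
theorem pv_common_contains_fold (gf : PySem.Dict String (List String)) (f : String) :
    ∀ (rest : List String) (c : PySem.Set String),
    ((rest.foldl (fun c t => PySem.Set.inter c (PySem.Set.ofList (gf.getD t []))) c).contains f)
      = (c.contains f && rest.all (fun t => (gf.getD t []).contains f)) := by
  intro rest
  induction rest with
  | nil => intro c; simp
  | cons t rest ih =>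
    intro c
    simp only [List.foldl_cons, List.all_cons, ih]
    have : (PySem.Set.inter c (PySem.Set.ofList (gf.getD t []))).contains f
        = (c.contains f && (gf.getD t []).contains f) := by
      simp [PySem.Set.inter, PySem.Set.contains, PySem.Set.mem_ofList]
    rw [this, Bool.and_assoc]

-- membership in pvCommon is membership in every tid's feature list
theorem pv_common_contains (gf : PySem.Dict String (List String)) (t0 : String) (rest : List String) (f : String) :
    (pvCommon gf (t0 :: rest)).contains f
      = (t0 :: rest).all (fun t => (gf.getD t []).contains f) := by
  unfold pvCommon
  rw [pv_common_contains_fold]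
  simp [PySem.Set.contains, PySem.Set.mem_ofList]

-- the per-group case folds of A and B agree (tids without duplicates)
theorem pv_group_case (gf : List (String × List String)) (gp : String × List String)
    (hnd : gp.2.Nodup) (case : PySem.Dict String (PySem.Set String)) :
    (pvCounterN gf gp).items.foldl (fun case p =>
        if List.length p.2 < gp.2.length then case.modify p.1 [] (fun s => PySem.Set.add s gp.1) else case) case
      = (PySem.List.dedup (gp.2.flatMap (fun t => (PySem.Dict.mk gf).getD t []))).foldl
          (fun case f =>
            if (pvCommon (PySem.Dict.mk gf) gp.2).contains f then case
            else case.modify f [] (fun s => PySem.Set.add s gp.1)) case := by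
  rcases htids : gp.2 with _ | ⟨t0, rest⟩
  · have h1 : pvCounterN gf gp = PySem.Dict.empty := by unfold pvCounterN; rw [htids]; rfl
    rw [h1]; rfl
  · have hitems : (pvCounterN gf gp).items
        = (pvCounterN gf gp).keys.map (fun f => (f, (pvCounterN gf gp).getD f [])) :=
      PySem.Dict.items_eq_map_keys _ (pv_counter_keys_nodup gf gp) []
    rw [hitems, List.foldl_map]
    rw [PySem.List.dedup_eq_ofList, ← htids, ← pv_counter_keys gf gp]
    apply PySem.List.foldl_congr_mem
    intro case f hf
    simp only
    rw [pv_counter_getD gf gp hnd f, htids, pv_common_contains]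
    by_cases hall : ((t0 :: rest).all (fun t => ((PySem.Dict.mk gf).getD t []).contains f)) = true
    · have hfull : ((t0 :: rest).filter (fun t => ((PySem.Dict.mk gf).getD t []).contains f)) = t0 :: rest :=
        List.filter_eq_self.mpr (by simpa [List.all_eq_true] using hall)
      rw [hfull, if_neg (Nat.lt_irrefl _), if_pos hall]
    · have hlt : ((t0 :: rest).filter (fun t => ((PySem.Dict.mk gf).getD t []).contains f)).length
          < (t0 :: rest).length := by
        rw [Nat.lt_iff_le_and_ne]
        refine ⟨List.length_filter_le _ _, ?_⟩
        rw [ne_eq, List.length_filter_eq_length_iff]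
        simpa [List.all_eq_true] using hall
      rw [if_pos hlt, if_neg hall]

-- ===== VERDICT (by name: the statement is the Claim_ definition above) =====
theorem features_to_caseids_spec : Claim_equal_features_to_caseids := by
  intro gf _ hpre
  unfold Spec_features_to_caseids features_to_caseids features_to_caseids_alt
  dsimp only
  rw [pv_A_split gf]
  dsimp only
  have hg : (List.foldl (fun d p => d.modify (pvGid p.1) [] fun l => l ++ [p.1]) PySem.Dict.empty gf)
      = pvGroups gf := rfl
  rw [hg]
  simp only [Prod.mk.injEq]
  constructor
  · congr 1
    apply PySem.List.foldl_congr_mem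
    intro case gp hgp
    exact pv_group_case gf gp (pv_groups_tids_nodup gf hpre gp hgp) case
  · congr 1
    simp only [PySem.Dict.values, List.foldl_map]
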